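-- pv_equiv track=rewrite | github.com/arpg/CU-Multi | dataset_tools/trajectory_clipper_new.py | generate_robot_color_cycle
-- ===== SOURCE A (Python) =====
-- from typing import Dict, List, Tuple
--
-- def generate_robot_color_cycle(robot_count: int) -> List[Tuple[int,int,int]]:
--     base_color_palette = [(87,227,137),
--             (192,97,203),
--             (255,163,72),
--             (98,160,234),
--             (255,99,132),
--             (255,206,86),
--             (75,192,192),
--             (153,102,255)]
--     color_list=[]; color_index=0
--     while len(color_list) < robot_count: color_list.append(base_color_palette[color_index % len(base_color_palette)]); color_index+=1
--     return color_list
-- ===== SOURCE B (Python) =====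
-- from typing import List, Tuple
--
-- def generate_robot_color_cycle(robot_count: int) -> List[Tuple[int,int,int]]:
--     base_color_palette = [(87,227,137),
--             (192,97,203),
--             (255,163,72),
--             (98,160,234),
--             (255,99,132),
--             (255,206,86),
--             (75,192,192),
--             (153,102,255)]
--     if robot_count <= 0:
--         return []
--     repeats = robot_count // len(base_color_palette) + 1
--     return (base_color_palette * repeats)[:robot_count]
-- ===== Notes on version B (the rewrite author's own statement) =====
-- stated objective: simpler
-- what changed: Replaces the element-by-element while loop with modulo indexing by a guard plus bulk palette repetition and a single slice.
import Mathlib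
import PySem

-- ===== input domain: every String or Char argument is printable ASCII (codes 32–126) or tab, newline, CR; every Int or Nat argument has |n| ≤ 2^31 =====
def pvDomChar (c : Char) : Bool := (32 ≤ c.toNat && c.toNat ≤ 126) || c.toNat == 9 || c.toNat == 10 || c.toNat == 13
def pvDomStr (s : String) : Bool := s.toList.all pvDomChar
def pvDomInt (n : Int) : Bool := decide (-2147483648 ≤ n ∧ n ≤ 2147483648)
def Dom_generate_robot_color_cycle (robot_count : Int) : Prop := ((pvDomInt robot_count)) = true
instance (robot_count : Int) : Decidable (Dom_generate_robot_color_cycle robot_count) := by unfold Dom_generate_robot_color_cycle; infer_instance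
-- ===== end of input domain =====

-- B replaces A's element-by-element while loop by a guard plus bulk palette repetition and one slice (objective: simpler).

-- ===== PORT A =====
def pvPalette : List (Int × Int × Int) :=
  [(87,227,137), (192,97,203), (255,163,72), (98,160,234),
   (255,99,132), (255,206,86), (75,192,192), (153,102,255)]

-- palette[color_index % 8]: the index is always in range (0 ≤ i%8 < 8), so getD is exact here
def pvPalGet (i : Int) : Int × Int × Int :=
  (PySem.List.pyGet? pvPalette i).getD (0,0,0)

def pvLoopA (robot_count : Int) (color_list : List (Int × Int × Int)) (color_index : Int) :
    List (Int × Int × Int) :=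
  if h : (color_list.length : Int) < robot_count then
    pvLoopA robot_count
      (color_list ++ [pvPalGet (PySem.Int.mod color_index (pvPalette.length : Int))])
      (color_index + 1)
  else color_list
termination_by robot_count.toNat - color_list.length
decreasing_by simp; omega

def generate_robot_color_cycle (robot_count : Int) : List (Int × Int × Int) :=
  pvLoopA robot_count [] 0

-- ===== PORT B =====
def generate_robot_color_cycle_alt (robot_count : Int) : List (Int × Int × Int) :=
  if robot_count ≤ 0 then []
  else
    -- repeats = robot_count // len(palette) + 1  (positive here, so .toNat is exact)
    -- (palette * repeats)[:robot_count] with robot_count > 0 is an exact take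
    (List.replicate (PySem.Int.floordiv robot_count (pvPalette.length : Int) + 1).toNat
      pvPalette).flatten.take robot_count.toNat

-- ===== PRECONDITION & SPEC =====
def Spec_generate_robot_color_cycle (robot_count : Int) (out : List (Int × Int × Int)) : Prop := out = generate_robot_color_cycle_alt robot_count
instance (robot_count : Int) (out : List (Int × Int × Int)) : Decidable (Spec_generate_robot_color_cycle robot_count out) := by unfold Spec_generate_robot_color_cycle; infer_instance

-- ===== CLAIM (what is proved, stated in full; the proofs are below) =====
def Claim_equal_generate_robot_color_cycle : Prop := ∀ (robot_count : Int), Dom_generate_robot_color_cycle robot_count → Spec_generate_robot_color_cycle robot_count (generate_robot_color_cycle robot_count)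

-- ===== LEMMAS AND PROOFS =====

-- canonical description: element j is palette[j % 8]
def pvF (j : Nat) : Int × Int × Int := pvPalGet ((j % 8 : Nat) : Int)

theorem pvPalGet_natMod (k : Nat) :
    pvPalGet (PySem.Int.mod (k : Int) (pvPalette.length : Int)) = pvF k := by
  have : pvPalette.length = 8 := by decide
  rw [this]
  unfold pvF
  rw [show ((8:Nat):Int) = (8:Int) from rfl] at *
  rw [show PySem.Int.mod (k : Int) 8 = ((k % 8 : Nat) : Int) from
    by exact_mod_cast PySem.Int.mod_natCast k 8]

theorem pvLoopA_eq (n : Nat) : ∀ (rc : Int) (acc : List (Int × Int × Int)),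
    n = rc.toNat - acc.length →
    pvLoopA rc acc (acc.length : Int) =
      acc ++ (List.range n).map (fun j => pvF (acc.length + j)) := by
  induction n with
  | zero =>
    intro rc acc h
    rw [pvLoopA]
    have : ¬ ((acc.length : Int) < rc) := by omega
    simp [this]
  | succ n ih =>
    intro rc acc h
    rw [pvLoopA]
    have hlt : (acc.length : Int) < rc := by omega
    simp only [hlt, dif_pos]
    rw [pvPalGet_natMod]
    have hlen : (acc ++ [pvF acc.length]).length = acc.length + 1 := by simp
    have := ih rc (acc ++ [pvF acc.length]) (by rw [hlen]; omega)
    rw [show (acc.length : Int) + 1 = (((acc ++ [pvF acc.length]).length : Nat) : Int) by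
      simp] at *
    rw [this]
    simp [List.range_succ_eq_map, List.append_assoc, Function.comp_def, Nat.add_comm,
      Nat.add_left_comm]

theorem pvFlatten_replicate (r : Nat) :
    (List.replicate r pvPalette).flatten = (List.range (8 * r)).map pvF := by
  induction r with
  | zero => simp
  | succ r ih =>
    have h8 : 8 * (r + 1) = 8 + 8 * r := by ring
    rw [List.replicate_succ, List.flatten_cons, ih, h8, List.range_add, List.map_append]
    refine congrArg₂ (· ++ ·) (by decide) ?_
    rw [List.map_map]
    apply List.map_congr_left
    intro j _
    show pvF j = pvF (8 + j)
    simp [pvF]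

theorem pvB_eq (rc : Int) (hpos : 0 < rc) :
    generate_robot_color_cycle_alt rc = (List.range rc.toNat).map pvF := by
  unfold generate_robot_color_cycle_alt
  have hne : ¬ rc ≤ 0 := by omega
  simp only [hne, if_false]
  have hlen : (pvPalette.length : Int) = 8 := by decide
  rw [hlen, pvFlatten_replicate]
  set r := (PySem.Int.floordiv rc 8 + 1).toNat with hr
  have hdiv : PySem.Int.floordiv rc 8 = rc / 8 :=
    PySem.Int.floordiv_eq_ediv_of_pos (by omega)
  have hmod := Int.mul_ediv_add_emod rc 8
  have hm1 : 0 ≤ rc % 8 := Int.emod_nonneg rc (by omega)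
  have hm2 : rc % 8 < 8 := Int.emod_lt_of_pos rc (by omega)
  have hq : 0 ≤ rc / 8 := Int.ediv_nonneg (by omega) (by omega)
  have hle : rc.toNat ≤ 8 * r := by
    rw [hr, hdiv]; omega
  rw [← List.map_take, List.take_range, min_eq_left hle]

-- ===== VERDICT (by name: the statement is the Claim_ definition above) =====
theorem generate_robot_color_cycle_spec : Claim_equal_generate_robot_color_cycle := by
  intro rc _
  unfold Spec_generate_robot_color_cycle generate_robot_color_cycle
  by_cases hpos : 0 < rc
  · have hA := pvLoopA_eq rc.toNat rc [] (by simp)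
    simp only [List.length_nil, Nat.cast_zero, List.nil_append, Nat.zero_add] at hA
    rw [hA, pvB_eq rc hpos]
  · have h0 : rc.toNat = 0 := by omega
    rw [pvLoopA]
    have : ¬ (((([] : List (Int × Int × Int)).length : Nat) : Int) < rc) := by simp; omega
    simp only [this]
    unfold generate_robot_color_cycle_alt
    have : rc ≤ 0 := by omega
    simp [this]
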